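-- pv_equiv track=rewrite | github.com/SeyoungCho/AlgorithmEx | Programmers/level3/convertibleBinaryTree.py | get_min_digits
-- ===== SOURCE A (Python) =====
-- def get_min_digits(num):
--     original_digit = len(num)
--     if original_digit == 1:
--         return 1
--     target_digit = 1
--     while original_digit > (target_digit - 1):
--         target_digit *= 2
--     return target_digit - 1
-- ===== SOURCE B (Python) =====
-- def get_min_digits(num):
--     # closed form: smallest 2^k - 1 that is >= len(num)
--     return (1 << len(num).bit_length()) - 1
-- ===== Notes on version B (the rewrite author's own statement) =====
-- stated objective: simpler
-- what changed: Replaces the doubling while-loop (and its redundant len==1 special case) by the closed form (1 << len(num).bit_length()) - 1.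
import Mathlib
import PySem

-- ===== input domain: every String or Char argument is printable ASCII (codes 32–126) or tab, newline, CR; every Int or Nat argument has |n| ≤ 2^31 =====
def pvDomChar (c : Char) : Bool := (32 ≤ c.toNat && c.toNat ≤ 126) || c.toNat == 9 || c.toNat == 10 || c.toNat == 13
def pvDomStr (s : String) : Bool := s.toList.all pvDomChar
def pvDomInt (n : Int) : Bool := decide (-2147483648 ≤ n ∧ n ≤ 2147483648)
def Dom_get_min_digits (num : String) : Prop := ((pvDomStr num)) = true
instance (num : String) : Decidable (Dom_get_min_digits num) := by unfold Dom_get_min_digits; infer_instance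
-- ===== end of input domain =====

-- B replaces A's doubling while-loop (and its redundant len==1 guard) by the closed form
-- (1 << len(num).bit_length()) - 1; objective: simpler.

-- ===== PORT A =====
-- the while loop of A; target_digit starts at 1 and only doubles, so 1 ≤ target is an
-- invariant carried as a hypothesis purely for termination (Prop argument, no computation)
def pvLoopA (orig : Int) (target : Int) (h : 1 ≤ target) : Int :=
  if orig > target - 1 then pvLoopA orig (target * 2) (by omega) else target - 1
termination_by (orig + 1 - target).toNat
decreasing_by omega

def get_min_digits (num : String) : Int :=
  let original_digit : Int := PySem.Str.len num
  if original_digit = 1 then 1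
  else pvLoopA original_digit 1 (by norm_num)

-- ===== PORT B =====
def get_min_digits_alt (num : String) : Int :=
  ((1 : Int) <<< PySem.Int.bitLength (PySem.Str.len num)) - 1

-- ===== PRECONDITION & SPEC =====
def Spec_get_min_digits (num : String) (out : Int) : Prop := out = get_min_digits_alt num
instance (num : String) (out : Int) : Decidable (Spec_get_min_digits num out) := by unfold Spec_get_min_digits; infer_instance

-- ===== CLAIM (what is proved, stated in full; the proofs are below) =====
def Claim_equal_get_min_digits : Prop := ∀ (num : String), Dom_get_min_digits num → Spec_get_min_digits num (get_min_digits num)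

-- ===== LEMMAS AND PROOFS =====

lemma pvLoopA_congr (orig t t' : Int) (h : 1 ≤ t) (h' : 1 ≤ t') (e : t = t') :
    pvLoopA orig t h = pvLoopA orig t' h' := by subst e; rfl

lemma pv_one_le_pow (k : Nat) : (1 : Int) ≤ 2 ^ k := one_le_pow₀ (by norm_num)

lemma pvLoopA_eq (n j : Nat) (h : (1 : Int) ≤ 2 ^ j) :
    pvLoopA (n : Int) ((2 : Int) ^ j) h
      = (2 : Int) ^ (max j (PySem.Int.bitLength (n : Int))) - 1 := by
  have hbl : n < 2 ^ PySem.Int.bitLength (n : Int) := by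
    have := PySem.Int.lt_two_pow_bitLength (n : Int)
    simpa using this
  by_cases hc : (n : Int) > (2 : Int) ^ j - 1
  · have hjn : 2 ^ j ≤ n := by exact_mod_cast (by push_cast at hc ⊢; omega : ((2:Nat)^j : Int) ≤ (n : Int))
    have hjbl : j < PySem.Int.bitLength (n : Int) := by
      have : (2:Nat) ^ j < 2 ^ PySem.Int.bitLength (n : Int) := lt_of_le_of_lt hjn hbl
      exact (Nat.pow_lt_pow_iff_right (by norm_num)).mp this
    rw [pvLoopA, if_pos hc]
    rw [pvLoopA_congr (n : Int) ((2:Int)^j * 2) ((2:Int)^(j+1))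
      (by have := pv_one_le_pow j; omega) (pv_one_le_pow (j+1)) (by ring)]
    rw [pvLoopA_eq n (j + 1) (pv_one_le_pow (j+1))]
    have : max (j + 1) (PySem.Int.bitLength (n : Int)) = max j (PySem.Int.bitLength (n : Int)) := by
      omega
    rw [this]
  · have hnj : n < 2 ^ j := by
      have hc' : (n : Int) < (2 : Int) ^ j := by omega
      exact_mod_cast hc'
    have hblj : PySem.Int.bitLength (n : Int) ≤ j := by
      rcases Nat.eq_zero_or_pos n with h0 | h0
      · subst h0; simp [PySem.Int.bitLength_zero]
      · have hne : (n : Int) ≠ 0 := by exact_mod_cast h0.ne'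
        have hlow := PySem.Int.two_pow_bitLength_le (n : Int) hne
        have hlow' : 2 ^ (PySem.Int.bitLength (n : Int) - 1) ≤ n := by simpa using hlow
        have : 2 ^ (PySem.Int.bitLength (n : Int) - 1) < 2 ^ j := lt_of_le_of_lt hlow' hnj
        have := (Nat.pow_lt_pow_iff_right (by norm_num : 1 < 2)).mp this
        omega
    rw [pvLoopA, if_neg hc, max_eq_left hblj]
termination_by n + 1 - 2 ^ j
decreasing_by
  have h1 : 1 ≤ (2:Nat) ^ j := Nat.one_le_two_pow
  omega

lemma pv_shift (k : Nat) : (1 : Int) <<< k = (2 : Int) ^ k := by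
  rw [Int.shiftLeft_eq]; ring

theorem get_min_digits_spec : Claim_equal_get_min_digits := by
  intro num _
  unfold Spec_get_min_digits get_min_digits get_min_digits_alt
  have hlen : PySem.Str.len num = (num.toList.length : Int) := PySem.Str.len_eq num
  rw [hlen, pv_shift]
  set m := num.toList.length with hm
  by_cases h1 : (m : Int) = 1
  · have hm1 : m = 1 := by exact_mod_cast h1
    rw [if_pos h1, hm1]; decide
  · rw [if_neg h1]
    rw [pvLoopA_congr (m : Int) 1 ((2:Int)^0) (by norm_num) (by norm_num) (by norm_num)]
    rw [pvLoopA_eq m 0 (by norm_num)]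
    simp
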